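/-
  SMOKE TEST of the interface start_decoder.R15 → init_blocksize (S8: Vorbis/Spec/MdctTop.lean). In a file of its own because
  Vorbis/Spec/Mdct.lean (S8) and Vorbis/Spec/Reader.lean (S2) both define `Vorbis.Spec.check_site` and cannot be imported together
  (a FINDING for the freeze; the other tests import Reader).
-/
import Vorbis.Spec.StartDecoderB
import Vorbis.Spec.MdctTop
namespace Vorbis.Spec.StartDecoder
open X86 X86.User Asan

/-- S8's "blocks allocated since `A`" and S5's are ONE definition (`Since`, Vorbis/Arena.lean §9): the post
`Mdct.Tables (Since A A') …` of `init_blocksize.spec` is the clause from which R15 builds `OwnAll.mdct`; a table of the call is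
no block of the entry arena `A`. -/
example (A A' : Arena) (B : Block) (h : Since A A' B) : A'.Blk B ∧ ¬ A.Blk B := ⟨h.blk, h.fresh⟩

/-- **The precondition of `init_blocksize(f, b, blocksize_b)`** at R15's two calls, from the channel loop's exit state: the arena
layer, `*f` inside one live object, `b < 2`, `n = 2^k` (HD3), `log2_4` a live object with its contents (`Frame.sh7`). -/
example {u₀ : State} {g : Ghost} {A9 : Arena} {A : Arena × List Obj} {i k : Nat} {v s : State}
    (h : BodyR15 u₀ g i A9 A v) (hrsp : (s.reg .rsp).toNat + 8 = g.R) (hmem : s.mem = v.mem)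
    (hrdi : (s.reg .rdi).toNat = g.f) (hb : arg32 s .rsi < 2) (hn : Mdct.Ld (arg32 s .rdx) k) :
    (init_blocksize.spec A.2 g.frames' A.1 k).pre s := by
  have hsub : ∀ o, o ∈ stackObjs g.frames ++ A.2 → o ∈ stackObjs g.frames' ++ A.2 := by
    intro o ho
    unfold Ghost.frames'
    rw [stackObjs_cons]
    rcases List.mem_append.mp ho with h1 | h2
    · exact List.mem_append_left _ (List.mem_append_right _ h1)
    · exact List.mem_append_right _ h2
  have hobj : LiveIn A.2 g.frames' g.f Off.sizeof.stb_vorbis := by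
    obtain ⟨o, ho, h1, h2⟩ := h.hand.obj
    exact ⟨o, hsub o ho, h1, h2⟩
  have hsh : ShadowPre A.2 g.frames' s := by
    refine ⟨?_, h.frame.offText⟩
    rw [hrsp, hmem]
    exact h.frame.shadow
  refine ⟨⟨hsh, ?_, ?_, h.hand.arenaText⟩, ?_, hb, hn, h.hand.globals _ (by decide), ?_⟩
  · rw [hrdi]
    obtain ⟨o, ho, h1, h2⟩ := hobj
    unfold ObjLive
    rw [Block.live_iff]
    intro x hx
    have hx' : g.f ≤ x ∧ x < g.f + Off.sizeof.stb_vorbis := hx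
    refine ⟨o, ho, ?_⟩
    unfold Obj.Bytes
    omega
  · rw [hrdi, hmem]
    exact h.mid.arena
  · rw [hrdi]
    exact hobj
  · rw [hmem]
    exact h.frame.sh7

end Vorbis.Spec.StartDecoder
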